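-- pv_equiv track=rewrite | github.com/R4x02/Informatyka | zad72.py | zadanie_3
-- ===== SOURCE A (Python) =====
-- def ile_yap_yap_yap(napis1, napis2):
-- 	min_dlugosc = min(len(napis1), len(napis2))
-- 	licznik = 0
-- 	while licznik < min_dlugosc and napis1[-(licznik+1)] == napis2[-(licznik+1)]:
-- 		licznik += 1
-- 	return licznik
--
-- def zadanie_3(lista_napisow):
-- 	maks = 0
-- 	lista = []
-- 	for napisy in lista_napisow:
-- 		napis1, napis2 = napisy
-- 		k = ile_yap_yap_yap(napis1, napis2)
-- 		if k > maks:
-- 			maks = k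
-- 			lista = [(napis1, napis2)]
-- 		elif k == maks:
-- 			lista.append((napis1, napis2))
-- 	return maks, lista
-- ===== SOURCE B (Python) =====
-- def zadanie_3(lista_napisow):
--     ks = []
--     for a, b in lista_napisow:
--         n = 0
--         for x, y in zip(reversed(a), reversed(b)):
--             if x != y:
--                 break
--             n += 1
--         ks.append(n)
--     m = max(ks, default=0)
--     return m, [p for p, k in zip(lista_napisow, ks) if k == m]
-- ===== Notes on version B (the rewrite author's own statement) =====
-- stated objective: alternative
-- what changed: Replaces the single-pass running-maximum-with-reset accumulator by a two-pass table-then-filter structure: compute all common-suffix lengths via zip of reversed strings, take max(..., default=0), then filter the pairs attaining it.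
import Mathlib
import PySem

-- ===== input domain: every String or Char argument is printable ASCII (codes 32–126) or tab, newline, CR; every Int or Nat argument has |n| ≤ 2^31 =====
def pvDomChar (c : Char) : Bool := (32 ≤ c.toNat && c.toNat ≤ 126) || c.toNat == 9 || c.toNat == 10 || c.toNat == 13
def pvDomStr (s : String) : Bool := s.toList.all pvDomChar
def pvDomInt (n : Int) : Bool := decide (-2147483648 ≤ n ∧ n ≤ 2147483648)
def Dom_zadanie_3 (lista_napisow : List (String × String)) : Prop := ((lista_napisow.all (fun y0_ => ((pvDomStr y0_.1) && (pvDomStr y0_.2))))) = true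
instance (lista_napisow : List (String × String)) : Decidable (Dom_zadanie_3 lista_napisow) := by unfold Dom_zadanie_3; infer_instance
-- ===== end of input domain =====

-- B replaces A's single-pass running-maximum-with-reset accumulator by a two-pass
-- table-then-filter decomposition (compute all suffix lengths, take the max, filter);
-- objective: alternative structure, same asymptotic cost.

-- ===== PORT A =====
-- while licznik < min_dlugosc and napis1[-(licznik+1)] == napis2[-(licznik+1)]: licznik += 1
def ileLoop (a b : List Char) (m licznik : Nat) : Nat :=
  if h : licznik < m then
    if PySem.List.pyGet? a (-((licznik : Int) + 1)) == PySem.List.pyGet? b (-((licznik : Int) + 1)) then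
      ileLoop a b m (licznik + 1)
    else licznik
  else licznik
termination_by m - licznik
decreasing_by omega

def ile_yap_yap_yap (napis1 napis2 : String) : Int :=
  ((ileLoop napis1.toList napis2.toList (min napis1.toList.length napis2.toList.length) 0 : Nat) : Int)

def zadanie_3 (lista_napisow : List (String × String)) : Int × (List (String × String)) :=
  lista_napisow.foldl
    (fun st napisy =>
      let k := ile_yap_yap_yap napisy.1 napisy.2
      if k > st.1 then (k, [napisy])
      else if k = st.1 then (st.1, st.2 ++ [napisy])
      else st)
    ((0 : Int), [])

-- ===== PORT B =====
-- n = 0; for x, y in zip(reversed(a), reversed(b)): if x != y: break; n += 1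
def sufZip : List Char → List Char → Int
  | x :: xs, y :: ys => if x == y then sufZip xs ys + 1 else 0
  | _, _ => 0

def zadanie_3_alt (lista_napisow : List (String × String)) : Int × (List (String × String)) :=
  let ks := lista_napisow.map (fun p => sufZip p.1.toList.reverse p.2.toList.reverse)
  let m : Int := match PySem.List.max? ks (fun x => x) with
    | none => 0
    | some v => v
  (m, ((lista_napisow.zip ks).filter (fun pk => pk.2 == m)).map Prod.fst)

-- ===== PRECONDITION & SPEC =====
def Spec_zadanie_3 (lista_napisow : List (String × String)) (out : Int × (List (String × String))) : Prop := out = zadanie_3_alt lista_napisow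
instance (lista_napisow : List (String × String)) (out : Int × (List (String × String))) : Decidable (Spec_zadanie_3 lista_napisow out) := by unfold Spec_zadanie_3; infer_instance

-- ===== CLAIM (what is proved, stated in full; the proofs are below) =====
def Claim_equal_zadanie_3 : Prop := ∀ (lista_napisow : List (String × String)), Dom_zadanie_3 lista_napisow → Spec_zadanie_3 lista_napisow (zadanie_3 lista_napisow)

-- ===== LEMMAS AND PROOFS =====

def fSuf (p : String × String) : Int := sufZip p.1.toList.reverse p.2.toList.reverse

def mx (l : List (String × String)) (M : Int) : Int :=
  l.foldl (fun m p => max m (fSuf p)) M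

def stepF (st : Int × List (String × String)) (p : String × String) :
    Int × List (String × String) :=
  if fSuf p > st.1 then (fSuf p, [p])
  else if fSuf p = st.1 then (st.1, st.2 ++ [p])
  else st

lemma sufZip_nil_left (ys : List Char) : sufZip [] ys = 0 := by cases ys <;> rfl

lemma sufZip_nil_right (xs : List Char) : sufZip xs [] = 0 := by cases xs <;> rfl

lemma sufZip_nonneg (xs ys : List Char) : 0 ≤ sufZip xs ys := by
  induction xs generalizing ys with
  | nil => simp [sufZip_nil_left]
  | cons x xs ih =>
    cases ys with
    | nil => simp [sufZip_nil_right]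
    | cons y ys =>
      simp only [sufZip]
      split
      · have := ih ys; omega
      · omega

lemma pyGet_rev (l : List Char) (k : Nat) (hl : k < l.length) :
    PySem.List.pyGet? l (-((k : Int) + 1)) = l.reverse[k]? := by
  rw [show (-((k : Int) + 1)) = -(((k + 1 : Nat) : Int)) by push_cast; ring]
  rw [PySem.List.pyGet?_neg_natCast l (k + 1) (by omega) (by omega)]
  rw [List.getElem?_reverse (by omega)]
  congr 1
  omega

lemma ileLoop_eq (n : Nat) (a b : List Char) (k : Nat)
    (hn : min a.length b.length - k = n) (hk : k ≤ min a.length b.length) :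
    ((ileLoop a b (min a.length b.length) k : Nat) : Int)
      = (k : Int) + sufZip (a.reverse.drop k) (b.reverse.drop k) := by
  induction n generalizing k with
  | zero =>
    rw [ileLoop, dif_neg (by omega)]
    rcases le_total a.length b.length with h | h
    · have hnil : a.reverse.drop k = [] := by
        apply List.drop_eq_nil_of_le
        simp
        omega
      rw [hnil, sufZip_nil_left]
      simp
    · have hnil : b.reverse.drop k = [] := by
        apply List.drop_eq_nil_of_le
        simp
        omega
      rw [hnil, sufZip_nil_right]
      simp
  | succ n ih =>
    have hlt : k < min a.length b.length := by omega
    have hka : k < a.length := by omega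
    have hkb : k < b.length := by omega
    have hka' : k < a.reverse.length := by simp; omega
    have hkb' : k < b.reverse.length := by simp; omega
    rw [ileLoop, dif_pos hlt]
    rw [pyGet_rev a k hka, pyGet_rev b k hkb]
    rw [List.getElem?_eq_getElem hka', List.getElem?_eq_getElem hkb']
    rw [List.drop_eq_getElem_cons hka', List.drop_eq_getElem_cons hkb']
    simp only [Option.some_beq_some, sufZip]
    by_cases hxy : a.reverse[k] = b.reverse[k]
    · rw [if_pos (by simpa using hxy), if_pos (by simpa using hxy)]
      rw [ih (k + 1) (by omega) (by omega)]
      push_cast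
      ring
    · rw [if_neg (by simpa using hxy), if_neg (by simpa using hxy)]
      simp

lemma ile_eq (p : String × String) : ile_yap_yap_yap p.1 p.2 = fSuf p := by
  have := ileLoop_eq (min p.1.toList.length p.2.toList.length) p.1.toList p.2.toList 0
    (by omega) (by omega)
  simpa [ile_yap_yap_yap, fSuf] using this

lemma le_mx (l : List (String × String)) (M : Int) : M ≤ mx l M := by
  induction l generalizing M with
  | nil => simp [mx]
  | cons p l ih =>
    have := ih (max M (fSuf p))
    simp only [mx, List.foldl_cons] at *
    exact le_trans (le_max_left _ _) this

lemma zip_filter_eq (l : List (String × String)) (m : Int) :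
    ((l.zip (l.map fSuf)).filter (fun pk => pk.2 == m)).map Prod.fst
      = l.filter (fun p => fSuf p == m) := by
  induction l with
  | nil => rfl
  | cons p l ih =>
    simp only [List.map_cons, List.zip_cons_cons, List.filter_cons]
    by_cases h : fSuf p = m
    · simp [h, ih]
    · simp [h, ih, beq_iff_eq]

lemma foldA_char (l : List (String × String)) (M : Int) (L : List (String × String)) :
    l.foldl stepF (M, L)
      = (mx l M, (if M < mx l M then [] else L) ++ l.filter (fun p => fSuf p == mx l M)) := by
  induction l generalizing M L with
  | nil => simp [mx]
  | cons p l ih =>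
    have hmx : mx (p :: l) M = mx l (max M (fSuf p)) := by simp [mx]
    rw [List.foldl_cons]
    by_cases h1 : fSuf p > M
    · rw [show stepF (M, L) p = (fSuf p, [p]) by simp [stepF, h1]]
      rw [ih (fSuf p) [p]]
      have hm : mx (p :: l) M = mx l (fSuf p) := by rw [hmx, max_eq_right (le_of_lt h1)]
      have hle : fSuf p ≤ mx l (fSuf p) := le_mx l (fSuf p)
      rw [hm]
      by_cases h2 : fSuf p < mx l (fSuf p)
      · rw [if_pos h2, if_pos (show M < mx l (fSuf p) by omega),
          List.filter_cons_of_neg (by simp only [beq_iff_eq]; simpa using (by omega : ¬ fSuf p = mx l (fSuf p)))]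
      · have heq : mx l (fSuf p) = fSuf p := by omega
        rw [if_neg h2, if_pos (show M < mx l (fSuf p) by omega),
          List.filter_cons_of_pos (by simp [heq])]
        simp
    · by_cases h2 : fSuf p = M
      · rw [show stepF (M, L) p = (M, L ++ [p]) by simp [stepF, h2]]
        rw [ih M (L ++ [p])]
        have hm : mx (p :: l) M = mx l M := by rw [hmx, h2, max_self]
        rw [hm]
        by_cases h3 : M < mx l M
        · rw [if_pos h3, if_pos h3,
            List.filter_cons_of_neg (by simp only [beq_iff_eq]; simpa using (by omega : ¬ fSuf p = mx l M))]
        · have heq : mx l M = M := le_antisymm (by omega) (le_mx l M)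
          rw [if_neg h3, if_neg h3,
            List.filter_cons_of_pos (by simp [heq, h2])]
          simp
      · rw [show stepF (M, L) p = (M, L) by simp [stepF, h1, h2]]
        rw [ih M L]
        have hm : mx (p :: l) M = mx l M := by
          rw [hmx, max_eq_left (by omega)]
        rw [hm]
        rw [List.filter_cons_of_neg
          (by simp only [beq_iff_eq]; simpa using (show ¬ fSuf p = mx l M by have := le_mx l M; omega))]

lemma altB_char (l : List (String × String)) :
    zadanie_3_alt l = (mx l 0, l.filter (fun p => fSuf p == mx l 0)) := by
  unfold zadanie_3_alt
  dsimp only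
  have hks : (fun (p : String × String) => sufZip p.1.toList.reverse p.2.toList.reverse) = fSuf := rfl
  rw [hks]
  have hm : (match PySem.List.max? (l.map fSuf) (fun x => x) with
      | none => (0 : Int) | some v => v) = mx l 0 := by
    cases l with
    | nil => simp [PySem.List.max?, mx]
    | cons p l =>
      rw [List.map_cons, PySem.List.max?_id_cons]
      simp only [mx, List.foldl_cons, List.foldl_map]
      rw [max_eq_right (show (0 : Int) ≤ fSuf p from sufZip_nonneg _ _)]
  rw [hm, zip_filter_eq]

-- ===== VERDICT (by name: the statement is the Claim_ definition above) =====
theorem zadanie_3_spec : Claim_equal_zadanie_3 := by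
  intro l _
  unfold Spec_zadanie_3
  have hfun : (fun (st : Int × List (String × String)) (napisy : String × String) =>
      let k := ile_yap_yap_yap napisy.1 napisy.2
      if k > st.1 then (k, [napisy])
      else if k = st.1 then (st.1, st.2 ++ [napisy])
      else st) = stepF := by
    funext st p
    simp only [ile_eq, stepF]
  have hA : zadanie_3 l = (mx l 0, l.filter (fun p => fSuf p == mx l 0)) := by
    unfold zadanie_3
    rw [hfun, foldA_char]
    by_cases h : (0 : Int) < mx l 0 <;> simp [h]
  rw [hA, altB_char]
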